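-- pv_equiv track=rewrite | github.com/Anuragdash30/AQI---Deep-Blue | AQI/firstPage/views.py | getpredcolor
-- ===== SOURCE A (Python) =====
-- def getpredcolor(aqipredic):
--     pool = []
--     for x in aqipredic:
--         if x >= 300:
--             pool.append("#800000")
--
--         elif x >= 201 and x < 300:
--             pool.append("#9C27B0")
--
--         elif (x >= 151 and x < 201):
--             pool.append("#f44336")
--
--         elif (x >= 101 and x < 151):
--             pool.append("#FF9100")
--
--         elif (x >= 51 and x < 101):
--             pool.append("#FFEA00")
--
--         else:
--             pool.append("#00C853")
--     return pool
-- ===== SOURCE B (Python) =====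
-- BREAKS = [51, 101, 151, 201, 300]
-- COLORS = ["#00C853", "#FFEA00", "#FF9100", "#f44336", "#9C27B0", "#800000"]
--
--
-- def getpredcolor(aqipredic):
--     return [COLORS[sum(x >= b for b in BREAKS)] for x in aqipredic]
-- ===== Notes on version B (the rewrite author's own statement) =====
-- stated objective: idiomatic
-- what changed: Replaced the six-way if/elif threshold cascade building a list by append with a table lookup: a sorted breakpoint list and a parallel color list, indexing by the number of breakpoints each value meets, in a single comprehension.
import Mathlib
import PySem

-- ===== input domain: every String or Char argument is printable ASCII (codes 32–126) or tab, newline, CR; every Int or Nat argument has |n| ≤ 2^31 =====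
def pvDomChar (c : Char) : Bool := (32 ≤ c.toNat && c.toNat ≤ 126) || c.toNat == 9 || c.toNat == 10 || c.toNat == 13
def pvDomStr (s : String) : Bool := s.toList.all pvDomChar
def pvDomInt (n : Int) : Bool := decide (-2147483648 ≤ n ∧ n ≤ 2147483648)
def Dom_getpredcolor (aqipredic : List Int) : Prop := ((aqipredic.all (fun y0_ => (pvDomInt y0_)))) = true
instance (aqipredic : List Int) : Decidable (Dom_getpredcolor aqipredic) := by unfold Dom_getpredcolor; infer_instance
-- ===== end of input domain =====

-- B replaces A's six-way if/elif cascade with a breakpoint/color table lookup (idiomatic).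


-- ===== PORT A =====
def getpredcolor (aqipredic : List Int) : List String :=
  aqipredic.foldl (fun pool x =>
    if x ≥ 300 then pool ++ ["#800000"]
    else if x ≥ 201 ∧ x < 300 then pool ++ ["#9C27B0"]
    else if x ≥ 151 ∧ x < 201 then pool ++ ["#f44336"]
    else if x ≥ 101 ∧ x < 151 then pool ++ ["#FF9100"]
    else if x ≥ 51 ∧ x < 101 then pool ++ ["#FFEA00"]
    else pool ++ ["#00C853"]) []

-- ===== PORT B =====
def pvBreaks : List Int := [51, 101, 151, 201, 300]
def pvColors : List String := ["#00C853", "#FFEA00", "#FF9100", "#f44336", "#9C27B0", "#800000"]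

def getpredcolor_alt (aqipredic : List Int) : List String :=
  aqipredic.map (fun x => pvColors.getD (pvBreaks.countP (fun b => decide (x ≥ b))) "")

-- ===== PRECONDITION & SPEC =====
def Spec_getpredcolor (aqipredic : List Int) (out : List String) : Prop := out = getpredcolor_alt aqipredic
instance (aqipredic : List Int) (out : List String) : Decidable (Spec_getpredcolor aqipredic out) := by unfold Spec_getpredcolor; infer_instance

-- ===== CLAIM (what is proved, stated in full; the proofs are below) =====
def Claim_equal_getpredcolor : Prop := ∀ (aqipredic : List Int), Dom_getpredcolor aqipredic → Spec_getpredcolor aqipredic (getpredcolor aqipredic)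

-- ===== LEMMAS AND PROOFS =====

-- the per-element color of A's cascade equals B's table lookup
theorem pv_color_eq (x : Int) :
    (if x ≥ 300 then "#800000"
     else if x ≥ 201 ∧ x < 300 then "#9C27B0"
     else if x ≥ 151 ∧ x < 201 then "#f44336"
     else if x ≥ 101 ∧ x < 151 then "#FF9100"
     else if x ≥ 51 ∧ x < 101 then "#FFEA00"
     else "#00C853")
      = pvColors.getD (pvBreaks.countP (fun b => decide (x ≥ b))) "" := by
  by_cases h1 : x ≥ 300
  · simp [pvBreaks, pvColors, h1, show x ≥ 201 from by omega, show x ≥ 151 from by omega,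
      show x ≥ 101 from by omega, show x ≥ 51 from by omega]
  by_cases h2 : x ≥ 201
  · simp [pvBreaks, pvColors, h1, h2, show x < 300 from by omega, show x ≥ 151 from by omega,
      show x ≥ 101 from by omega, show x ≥ 51 from by omega]
  by_cases h3 : x ≥ 151
  · simp [pvBreaks, pvColors, h1, h2, h3, show x < 201 from by omega,
      show x ≥ 101 from by omega, show x ≥ 51 from by omega]
  by_cases h4 : x ≥ 101
  · simp [pvBreaks, pvColors, h1, h2, h3, h4, show x < 151 from by omega,
      show x ≥ 51 from by omega]
  by_cases h5 : x ≥ 51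
  · simp [pvBreaks, pvColors, h1, h2, h3, h4, h5, show x < 101 from by omega]
  · simp [pvBreaks, pvColors, h1, h2, h3, h4, h5]

theorem pv_foldl_eq (l : List Int) (acc : List String) :
    (l.foldl (fun pool x =>
      if x ≥ 300 then pool ++ ["#800000"]
      else if x ≥ 201 ∧ x < 300 then pool ++ ["#9C27B0"]
      else if x ≥ 151 ∧ x < 201 then pool ++ ["#f44336"]
      else if x ≥ 101 ∧ x < 151 then pool ++ ["#FF9100"]
      else if x ≥ 51 ∧ x < 101 then pool ++ ["#FFEA00"]
      else pool ++ ["#00C853"]) acc)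
      = acc ++ l.map (fun x => pvColors.getD (pvBreaks.countP (fun b => decide (x ≥ b))) "") := by
  induction l generalizing acc with
  | nil => simp
  | cons x xs ih =>
    simp only [List.foldl_cons, List.map_cons]
    rw [ih]
    have hx := pv_color_eq x
    split_ifs at hx ⊢ <;> simp [hx]

-- ===== VERDICT (by name: the statement is the Claim_ definition above) =====
theorem getpredcolor_spec : Claim_equal_getpredcolor := by
  intro l _
  unfold Spec_getpredcolor getpredcolor getpredcolor_alt
  simpa using pv_foldl_eq l []
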